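-- pv_equiv track=rewrite | github.com/bernalrbtec-ai/alreasense | backend/apps/chat/tasks.py | _mask_digits
-- ===== SOURCE A (Python) =====
-- def _mask_digits(value: str) -> str:
--     if not value or not isinstance(value, str):
--         return value
--     digits = ''.join(ch for ch in value if ch.isdigit())
--     if not digits:
--         return value
--     suffix = digits[-4:] if len(digits) > 4 else digits
--     return f"***{suffix}"
-- ===== SOURCE B (Python) =====
-- def _mask_digits(value: str) -> str:
--     if not value or not isinstance(value, str):
--         return value
--     buf = []
--     for ch in reversed(value):
--         if ch.isdigit():
--             buf.append(ch)
--             if len(buf) == 4: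
--                 break
--     if not buf:
--         return value
--     buf.reverse()
--     return "***" + "".join(buf)
-- ===== Notes on version B (the rewrite author's own statement) =====
-- stated objective: alternative
-- what changed: Instead of filtering all digits and then slicing the last four, B scans the string right-to-left collecting digits and stops as soon as four are gathered, then reverses the buffer.
import Mathlib
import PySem

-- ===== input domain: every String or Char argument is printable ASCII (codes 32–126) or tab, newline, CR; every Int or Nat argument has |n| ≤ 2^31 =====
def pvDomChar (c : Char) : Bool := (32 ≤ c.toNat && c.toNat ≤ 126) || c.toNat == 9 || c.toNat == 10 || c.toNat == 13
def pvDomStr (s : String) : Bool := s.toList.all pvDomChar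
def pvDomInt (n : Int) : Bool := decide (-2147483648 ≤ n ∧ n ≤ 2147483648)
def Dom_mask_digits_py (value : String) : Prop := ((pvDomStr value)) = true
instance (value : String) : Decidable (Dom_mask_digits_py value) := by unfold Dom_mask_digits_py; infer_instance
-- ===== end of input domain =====

-- B scans right-to-left collecting digits and stops after four instead of filtering all digits then slicing; same cost, different traversal (objective: alternative).


-- ===== PORT A =====
def mask_digits_py (value : String) : String :=
  if value = "" then value
  else
    -- ''.join(ch for ch in value if ch.isdigit())
    let digits := value.toList.filter PySem.Chars.isdigit
    if digits = [] then value
    else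
      -- digits[-4:] if len(digits) > 4 else digits
      let suffix := if digits.length > 4 then PySem.List.slice digits (some (-4)) none else digits
      String.ofList ('*' :: '*' :: '*' :: suffix)

-- ===== PORT B =====
-- the for-loop over reversed(value) with append and break at len(buf) == 4
def maskLoop : List Char → List Char → List Char
  | [], buf => buf
  | c :: rest, buf =>
    if PySem.Chars.isdigit c then
      let buf' := buf ++ [c]
      if buf'.length = 4 then buf' else maskLoop rest buf'
    else maskLoop rest buf

def mask_digits_py_alt (value : String) : String :=
  if value = "" then value
  else
    let buf := maskLoop value.toList.reverse []
    if buf = [] then value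
    else String.ofList ('*' :: '*' :: '*' :: buf.reverse)

-- ===== PRECONDITION & SPEC =====
def Spec_mask_digits_py (value : String) (out : String) : Prop := out = mask_digits_py_alt value
instance (value : String) (out : String) : Decidable (Spec_mask_digits_py value out) := by unfold Spec_mask_digits_py; infer_instance

-- ===== CLAIM (what is proved, stated in full; the proofs are below) =====
def Claim_equal_mask_digits_py : Prop := ∀ (value : String), Dom_mask_digits_py value → Spec_mask_digits_py value (mask_digits_py value)

-- ===== LEMMAS AND PROOFS =====

-- the break-at-4 loop collects the first (4 - buf.length) digits of its input
theorem maskLoop_eq (l : List Char) : ∀ buf : List Char, buf.length < 4 →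
    maskLoop l buf = buf ++ (l.filter PySem.Chars.isdigit).take (4 - buf.length) := by
  induction l with
  | nil => intro buf _; simp [maskLoop]
  | cons c rest ih =>
    intro buf h
    by_cases hd : PySem.Chars.isdigit c
    · simp only [maskLoop, hd, if_true, List.filter_cons, List.length_append,
        List.length_singleton]
      by_cases h4 : buf.length + 1 = 4
      · have : 4 - buf.length = 1 := by omega
        simp [h4, this, List.take_succ_cons]
      · rw [if_neg h4, ih (buf ++ [c]) (by simp; omega)]
        have : 4 - buf.length = (4 - (buf ++ [c]).length) + 1 := by simp; omega
        simp [this, List.take_succ_cons]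
    · simp only [maskLoop, hd, List.filter_cons]
      rw [ih buf h]
      simp

theorem mask_digits_py_spec : Claim_equal_mask_digits_py := by
  intro value _
  unfold Spec_mask_digits_py mask_digits_py mask_digits_py_alt
  by_cases hv : value = ""
  · simp [hv]
  · rw [if_neg hv, if_neg hv]
    have hbuf : maskLoop value.toList.reverse [] =
        ((value.toList.filter PySem.Chars.isdigit).reverse).take 4 := by
      rw [maskLoop_eq _ [] (by simp)]
      simp [List.filter_reverse]
    set digits := value.toList.filter PySem.Chars.isdigit with hdig
    rw [hbuf]
    by_cases hz : digits = []
    · simp [hz]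
    · have hsuf : (if digits.length > 4 then PySem.List.slice digits (some (-4)) none else digits)
          = (List.take 4 digits.reverse).reverse := by
        rw [List.take_reverse, List.reverse_reverse]
        by_cases hlen : digits.length > 4
        · rw [if_pos hlen, PySem.List.slice_from_neg_ofNat digits 4 (by omega)]
        · rw [if_neg hlen]
          have h0 : digits.length - 4 = 0 := by omega
          simp [h0]
      have hne : List.take 4 digits.reverse ≠ [] := by simp [hz]
      simp only [if_neg hz, if_neg hne, hsuf]

-- ===== VERDICT (by name: the statement is the Claim_ definition above) =====
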